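-- pv_equiv track=rewrite | github.com/comShadowHarvy/conf | scripts/bin/analyze_aliases_sections.py | analyze_by_content_heuristics
-- ===== SOURCE A (Python) =====
-- from typing import Dict, List, Tuple, NamedTuple
--
-- class Section(NamedTuple):
--     name: str
--     start_line: int
--     end_line: int
--     priority: int  # Load order priority (0 = highest)
--     depends: List[str]
--     load_condition: str
--     content: List[str]
--
-- def analyze_by_content_heuristics(lines: List[str]) -> Dict[str, Section]:
--     """Fallback analysis using content patterns when headers are unclear."""
--
--     sections = {}
--     current_content = []
--     current_name = '00-core'
--     start_line = 0
--
--     for i, line in enumerate(lines):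
--         stripped = line.strip()
--
--         # Skip comments and empty lines for analysis
--         if not stripped or stripped.startswith('#'):
--             current_content.append(line)
--             continue
--
--         # Heuristics for section detection
--         if any(keyword in stripped for keyword in ['git ', 'gh ', 'gst', 'gco']):
--             if current_name != '50-git':
--                 # Switch to git section
--                 if current_content:
--                     sections[current_name] = Section(current_name, start_line, i-1, 0, [], 'always', current_content)
--                 current_name = '50-git'
--                 current_content = []
--                 start_line = i
--         elif any(keyword in stripped for keyword in ['pacman', 'paru', 'yay', 'makepkg']):
--             if current_name != '30-package':
--                 if current_content:
--                     sections[current_name] = Section(current_name, start_line, i-1, 0, [], 'always', current_content)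
--                 current_name = '30-package'
--                 current_content = []
--                 start_line = i
--         elif any(keyword in stripped for keyword in ['systemd', 'journal', 'service']):
--             if current_name != '20-system':
--                 if current_content:
--                     sections[current_name] = Section(current_name, start_line, i-1, 0, [], 'always', current_content)
--                 current_name = '20-system'
--                 current_content = []
--                 start_line = i
--
--         current_content.append(line)
--
--     # Add final section
--     if current_content:
--         sections[current_name] = Section(current_name, start_line, len(lines)-1, 0, [], 'always', current_content)
--
--     return sections
-- ===== SOURCE B (Python) =====
-- from typing import Dict, List, Tuple, NamedTuple
--
-- class Section(NamedTuple):
--     name: str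
--     start_line: int
--     end_line: int
--     priority: int
--     depends: List[str]
--     load_condition: str
--     content: List[str]
--
-- _GROUPS = [
--     ('50-git', ['git ', 'gh ', 'gst', 'gco']),
--     ('30-package', ['pacman', 'paru', 'yay', 'makepkg']),
--     ('20-system', ['systemd', 'journal', 'service']),
-- ]
--
-- def _label(prev, line):
--     """Label of a line given the previous line's label."""
--     stripped = line.strip()
--     if not stripped or stripped.startswith('#'):
--         return prev
--     for name, keywords in _GROUPS:
--         if any(kw in stripped for kw in keywords):
--             return name
--     return prev
--
-- def _chunks(pairs):
--     """Maximal runs of consecutive pairs with equal labels."""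
--     out = []
--     i = 0
--     n = len(pairs)
--     while i < n:
--         k = i + 1
--         while k < n and pairs[k][1] == pairs[i][1]:
--             k += 1
--         out.append(pairs[i:k])
--         i = k
--     return out
--
-- def analyze_by_content_heuristics(lines: List[str]) -> Dict[str, Section]:
--     """Fallback analysis using content patterns when headers are unclear."""
--     labels = []
--     prev = '00-core'
--     for line in lines:
--         prev = _label(prev, line)
--         labels.append(prev)
--     sections = {}
--     start = 0
--     for chunk in _chunks(list(zip(lines, labels))):
--         name = chunk[0][1]
--         end = start + len(chunk) - 1
--         sections[name] = Section(name, start, end, 0, [], 'always',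
--                                  [ln for ln, _ in chunk])
--         start = end + 1
--     return sections
-- ===== Notes on version B (the rewrite author's own statement) =====
-- stated objective: alternative
-- what changed: A's single accumulate-and-flush loop (mutating current section state and emitting on keyword switches) is replaced by a two-pass decomposition: one scan assigns each line a label (keyword match or inherited), then maximal equal-label runs are grouped into chunks and each chunk is emitted as a section.
import Mathlib
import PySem

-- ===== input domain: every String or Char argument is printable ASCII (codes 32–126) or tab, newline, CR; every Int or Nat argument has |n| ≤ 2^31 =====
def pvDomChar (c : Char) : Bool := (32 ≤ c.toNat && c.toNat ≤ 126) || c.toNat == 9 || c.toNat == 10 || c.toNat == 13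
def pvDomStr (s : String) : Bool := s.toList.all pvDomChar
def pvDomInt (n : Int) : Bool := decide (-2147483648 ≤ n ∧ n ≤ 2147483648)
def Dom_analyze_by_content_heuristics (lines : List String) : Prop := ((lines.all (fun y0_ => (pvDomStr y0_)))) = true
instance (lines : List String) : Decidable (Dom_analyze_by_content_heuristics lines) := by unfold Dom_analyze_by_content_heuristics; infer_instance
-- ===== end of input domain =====

-- B relabels each line in one scan (a keyword label inherited across comment/blank/plain lines),
-- then groups maximal equal-label runs into sections — a two-pass decomposition replacing A's
-- single accumulate-and-flush loop; objective: alternative (same cost).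


-- a Section tuple: (name, start_line, end_line, priority, depends, load_condition, content)
abbrev pvSect : Type := String × String × Int × Int × Int × List String × String × List String
abbrev pvDict : Type := PySem.Dict String (String × Int × Int × Int × List String × String × List String)

-- ===== PORT A =====
-- loop state: (sections, current_content, current_name, start_line, i)
def pvAStep : (pvDict × List String × String × Int × Int) → String → (pvDict × List String × String × Int × Int)
  | (sections, content, name, start, i), line =>
    let stripped := PySem.Str.strip line
    if stripped = "" ∨ PySem.Str.startswith stripped "#" then
      (sections, content ++ [line], name, start, i + 1)
    else if PySem.Str.isIn "git " stripped || PySem.Str.isIn "gh " stripped ||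
            PySem.Str.isIn "gst" stripped || PySem.Str.isIn "gco" stripped then
      if name ≠ "50-git" then
        ((if content = [] then sections
          else sections.insert name (name, start, i - 1, 0, [], "always", content)),
         [line], "50-git", i, i + 1)
      else (sections, content ++ [line], name, start, i + 1)
    else if PySem.Str.isIn "pacman" stripped || PySem.Str.isIn "paru" stripped ||
            PySem.Str.isIn "yay" stripped || PySem.Str.isIn "makepkg" stripped then
      if name ≠ "30-package" then
        ((if content = [] then sections
          else sections.insert name (name, start, i - 1, 0, [], "always", content)),
         [line], "30-package", i, i + 1)
      else (sections, content ++ [line], name, start, i + 1)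
    else if PySem.Str.isIn "systemd" stripped || PySem.Str.isIn "journal" stripped ||
            PySem.Str.isIn "service" stripped then
      if name ≠ "20-system" then
        ((if content = [] then sections
          else sections.insert name (name, start, i - 1, 0, [], "always", content)),
         [line], "20-system", i, i + 1)
      else (sections, content ++ [line], name, start, i + 1)
    else (sections, content ++ [line], name, start, i + 1)

-- "Add final section" + return, on the loop's end state
def pvAWrap : List String → (pvDict × List String × String × Int × Int) → List pvSect
  | lines, (sections, content, name, start, _i) =>
    (if content = [] then sections
     else sections.insert name
       (name, start, (lines.length : Int) - 1, 0, [], "always", content)).items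

def analyze_by_content_heuristics (lines : List String) : List pvSect :=
  pvAWrap lines (lines.foldl pvAStep (PySem.Dict.empty, [], "00-core", 0, 0))

-- ===== PORT B =====
def pvLabel (prev : String) (line : String) : String :=
  let stripped := PySem.Str.strip line
  if stripped = "" ∨ PySem.Str.startswith stripped "#" then prev
  else if PySem.Str.isIn "git " stripped || PySem.Str.isIn "gh " stripped ||
          PySem.Str.isIn "gst" stripped || PySem.Str.isIn "gco" stripped then "50-git"
  else if PySem.Str.isIn "pacman" stripped || PySem.Str.isIn "paru" stripped ||
          PySem.Str.isIn "yay" stripped || PySem.Str.isIn "makepkg" stripped then "30-package"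
  else if PySem.Str.isIn "systemd" stripped || PySem.Str.isIn "journal" stripped ||
          PySem.Str.isIn "service" stripped then "20-system"
  else prev

def pvLabels (prev : String) : List String → List String
  | [] => []
  | l :: ls => pvLabel prev l :: pvLabels (pvLabel prev l) ls

-- maximal runs of consecutive (line, label) pairs with equal labels
def pvChunks : List (String × String) → List (List (String × String))
  | [] => []
  | p :: ps =>
    (p :: ps.takeWhile (fun q => q.2 == p.2)) ::
      pvChunks (ps.drop (ps.takeWhile (fun q => q.2 == p.2)).length)
  termination_by l => l.length
  decreasing_by
    simp only [List.length_drop, List.length_cons]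
    omega

def pvBuild : Int → List (List (String × String)) → pvDict → pvDict
  | _, [], d => d
  | start, [] :: rest, d => pvBuild start rest d  -- unreachable: pvChunks emits only nonempty chunks
  | start, (p :: run) :: rest, d =>
    pvBuild (start + ((p :: run).length : Int)) rest
      (d.insert p.2
        (p.2, start, start + ((p :: run).length : Int) - 1, 0, [], "always",
         (p :: run).map Prod.fst))

def analyze_by_content_heuristics_alt (lines : List String) : List pvSect :=
  (pvBuild 0 (pvChunks (lines.zip (pvLabels "00-core" lines))) PySem.Dict.empty).items

-- DecidableEq of the section tuple, assembled stepwise (one-shot synthesis exceeds the search limit)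
def pvDec1 : DecidableEq (String × List String) := instDecidableEqProd
def pvDec2 : DecidableEq (List String × String × List String) := @instDecidableEqProd _ _ _ pvDec1
def pvDec3 : DecidableEq (Int × List String × String × List String) := @instDecidableEqProd _ _ _ pvDec2
def pvDec4 : DecidableEq (Int × Int × List String × String × List String) := @instDecidableEqProd _ _ _ pvDec3
def pvDec5 : DecidableEq (Int × Int × Int × List String × String × List String) := @instDecidableEqProd _ _ _ pvDec4
def pvDec6 : DecidableEq (String × Int × Int × Int × List String × String × List String) := @instDecidableEqProd _ _ _ pvDec5
def pvDec7 : DecidableEq pvSect := @instDecidableEqProd _ _ _ pvDec6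
def pvDecList : DecidableEq (List pvSect) := @instDecidableEqList _ pvDec7

-- ===== PRECONDITION & SPEC =====
def Spec_analyze_by_content_heuristics (lines : List String) (out : List (String × String × Int × Int × Int × List String × String × List String)) : Prop := out = analyze_by_content_heuristics_alt lines
instance (lines : List String) (out : List (String × String × Int × Int × Int × List String × String × List String)) : Decidable (Spec_analyze_by_content_heuristics lines out) := by unfold Spec_analyze_by_content_heuristics; exact pvDecList out _

-- ===== CLAIM (what is proved, stated in full; the proofs are below) =====
def Claim_equal_analyze_by_content_heuristics : Prop := ∀ (lines : List String), Dom_analyze_by_content_heuristics lines → Spec_analyze_by_content_heuristics lines (analyze_by_content_heuristics lines)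

-- ===== LEMMAS AND PROOFS =====

-- the final flush of A, as a function of the loop state (proof-side helper)
def pvFinish (s : pvDict × List String × String × Int × Int) : pvDict :=
  if s.2.1 = [] then s.1
  else s.1.insert s.2.2.1 (s.2.2.1, s.2.2.2.1, s.2.2.2.2 - 1, 0, [], "always", s.2.1)

theorem pv_counter (ls : List String) :
    ∀ (d : pvDict) c nm (st i : Int),
      (ls.foldl pvAStep (d, c, nm, st, i)).2.2.2.2 = i + ls.length := by
  induction ls with
  | nil => intro d c nm st i; simp
  | cons l ls ih =>
    intro d c nm st i
    simp only [List.foldl_cons, List.length_cons, pvAStep]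
    split_ifs <;> simp only [ih] <;> push_cast <;> ring

theorem pv_step_keep (line : String) (d : pvDict) (c : List String) (nm : String) (st i : Int)
    (hl : pvLabel nm line = nm) :
    pvAStep (d, c, nm, st, i) line = (d, c ++ [line], nm, st, i + 1) := by
  simp only [pvAStep, pvLabel] at hl ⊢
  split_ifs at hl ⊢ <;> simp_all

theorem pv_step_switch (line : String) (d : pvDict) (c : List String) (nm : String) (st i : Int)
    (hl : pvLabel nm line ≠ nm) (hc : c ≠ []) :
    pvAStep (d, c, nm, st, i) line =
      (d.insert nm (nm, st, i - 1, 0, [], "always", c), [line], pvLabel nm line, i, i + 1) := by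
  simp only [pvAStep, pvLabel] at hl ⊢
  split_ifs at hl ⊢ <;> simp_all

theorem pv_takeWhile_homog (c : List String) (nm : String)
    (tail : List (String × String)) (ht : ∀ q ∈ tail.head?, q.2 ≠ nm) :
    ((c.map (fun l => (l, nm)) ++ tail).takeWhile (fun q => q.2 == nm))
      = c.map (fun l => (l, nm)) := by
  induction c with
  | nil =>
    cases tail with
    | nil => simp
    | cons q t =>
      have hq : q.2 ≠ nm := ht q (by simp)
      simp [hq]
  | cons x c ih => simp [ih]

theorem pv_chunks_homog (c : List String) (nm : String)
    (tail : List (String × String)) (hc : c ≠ [])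
    (ht : ∀ q ∈ tail.head?, q.2 ≠ nm) :
    pvChunks (c.map (fun l => (l, nm)) ++ tail)
      = c.map (fun l => (l, nm)) :: pvChunks tail := by
  cases c with
  | nil => exact absurd rfl hc
  | cons x c =>
    rw [List.map_cons, List.cons_append, pvChunks]
    have htw := pv_takeWhile_homog c nm tail ht
    simp only [htw, List.length_map]
    rw [List.drop_left' (by simp : (c.map (fun l => (l, nm))).length = c.length)]

theorem pv_key (rest : List String) :
    ∀ (c : List String) (nm : String) (st : Int) (d : pvDict), c ≠ [] →
      pvFinish (rest.foldl pvAStep (d, c, nm, st, st + (c.length : Int)))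
        = pvBuild st (pvChunks (c.map (fun l => (l, nm)) ++ rest.zip (pvLabels nm rest))) d := by
  induction rest with
  | nil =>
    intro c nm st d hc
    obtain ⟨x, c', rfl⟩ : ∃ x c', c = x :: c' := by
      cases c with
      | nil => exact absurd rfl hc
      | cons x c' => exact ⟨x, c', rfl⟩
    rw [List.foldl_nil]
    simp only [pvLabels, List.zip_nil_right]
    rw [pv_chunks_homog (x :: c') nm [] hc (by simp)]
    simp only [pvChunks, List.map_cons, pvBuild, pvFinish]
    simp [List.map_map, Function.comp_def]
  | cons line rest ih =>
    intro c nm st d hc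
    rw [List.foldl_cons]
    by_cases hl : pvLabel nm line = nm
    · rw [pv_step_keep line d c nm st _ hl]
      have hidx : st + (c.length : Int) + 1 = st + ((c ++ [line]).length : Int) := by
        simp; ring
      rw [hidx, ih (c ++ [line]) nm st d (by simp)]
      simp only [pvLabels, hl, List.zip_cons_cons, List.map_append, List.map_cons,
        List.map_nil, List.append_assoc, List.cons_append, List.nil_append]
    · rw [pv_step_switch line d c nm st _ hl hc]
      have H := ih [line] (pvLabel nm line) (st + (c.length : Int))
        (d.insert nm (nm, st, st + (c.length : Int) - 1, 0, [], "always", c)) (by simp)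
      simp only [List.length_cons, List.length_nil, List.map_cons, List.map_nil,
        List.singleton_append] at H
      norm_num at H
      simp only [pvLabels, List.zip_cons_cons]
      rw [pv_chunks_homog c nm _ hc
        (by intro q hq; simp only [List.head?_cons, Option.mem_def, Option.some.injEq] at hq
            rw [← hq]; exact hl)]
      obtain ⟨x, c', rfl⟩ : ∃ x c', c = x :: c' := by
        cases c with
        | nil => exact absurd rfl hc
        | cons x c' => exact ⟨x, c', rfl⟩
      rw [List.map_cons, pvBuild]
      simp only [List.length_cons, List.length_map, List.map_cons, List.map_map,
        Function.comp_def] at H ⊢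
      norm_num at H ⊢
      exact H

theorem pv_first_step (line : String) (d : pvDict) :
    pvAStep (d, [], "00-core", 0, 0) line = (d, [line], pvLabel "00-core" line, 0, 1) := by
  simp only [pvAStep, pvLabel]
  split_ifs <;> simp_all

theorem pv_wrap_finish (lines : List String) (s : pvDict × List String × String × Int × Int)
    (h : s.2.2.2.2 = (lines.length : Int)) : pvAWrap lines s = (pvFinish s).items := by
  obtain ⟨a, b, c, st, i⟩ := s
  simp only [pvAWrap, pvFinish] at *
  rw [← h]

-- ===== VERDICT (by name: the statement is the Claim_ definition above) =====
theorem analyze_by_content_heuristics_spec : Claim_equal_analyze_by_content_heuristics := by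
  intro lines _
  unfold Spec_analyze_by_content_heuristics analyze_by_content_heuristics analyze_by_content_heuristics_alt
  cases lines with
  | nil => simp [pvAWrap, pvChunks, pvBuild]
  | cons line rest =>
    simp only [List.foldl_cons, pv_first_step]
    rw [pv_wrap_finish (line :: rest) _ (by rw [pv_counter, List.length_cons]; push_cast; omega)]
    have K := pv_key rest [line] (pvLabel "00-core" line) 0 PySem.Dict.empty (by simp)
    simp only [List.length_cons, List.length_nil, List.map_cons, List.map_nil,
      List.singleton_append] at K
    norm_num at K
    simp only [pvLabels, List.zip_cons_cons]
    rw [K]
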